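-- pv_equiv track=rewrite | github.com/filojiston/codewars-solutions | last_survivors_ep2.py | calculate
-- ===== SOURCE A (Python) =====
-- def calculate(string):
--     sorted_str = "".join(sorted(string))
--     result = ''
--     i = 0
--     while i < len(sorted_str) - 1:
--         if (sorted_str[i] == sorted_str[i + 1]):
--             foo = chr(ord(sorted_str[i]) + 1) if sorted_str[i] != 'z' else 'a'
--             result += foo
--             i += 1
--         else:
--             result += sorted_str[i]
--         i += 1
--     result += sorted_str[len(sorted_str) - 1] if sorted_str.count(
--         sorted_str[len(sorted_str) - 1]) % 2 != 0 else ''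
--     return result
-- ===== SOURCE B (Python) =====
-- def calculate(string):
--     counts = {}
--     for ch in string:
--         counts[ch] = counts.get(ch, 0) + 1
--     pieces = []
--     for ch in sorted(counts):
--         n = counts[ch]
--         nxt = 'a' if ch == 'z' else chr(ord(ch) + 1)
--         pieces.append(nxt * (n // 2) + ch * (n % 2))
--     return ''.join(pieces)
-- ===== Notes on version B (the rewrite author's own statement) =====
-- stated objective: faster
-- what changed: B replaces A's sort-then-adjacent-pair scan over the whole string by a dictionary character counter: one counting pass, then one output piece (promoted-char repetitions plus the odd leftover) per distinct character in sorted key order.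
import Mathlib
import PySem

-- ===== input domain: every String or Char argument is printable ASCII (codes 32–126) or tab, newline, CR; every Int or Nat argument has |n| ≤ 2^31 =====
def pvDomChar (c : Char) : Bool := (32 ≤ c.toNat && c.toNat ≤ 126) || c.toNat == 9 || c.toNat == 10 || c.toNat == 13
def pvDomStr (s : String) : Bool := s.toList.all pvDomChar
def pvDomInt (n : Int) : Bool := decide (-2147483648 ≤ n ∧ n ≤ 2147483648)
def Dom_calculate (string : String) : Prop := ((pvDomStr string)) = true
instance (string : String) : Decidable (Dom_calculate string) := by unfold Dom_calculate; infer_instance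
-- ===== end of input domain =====

-- B replaces A's sort-then-adjacent-pairing scan by a character counter: one counting pass,
-- then one output piece per distinct character (objective: faster by a different algorithm).

-- ===== PORT A =====
-- A's while loop over sorted_str (i advances by 2 on an equal adjacent pair, by 1 otherwise;
-- it stops when i ≥ len - 1, i.e. when at most one character remains), as the obvious
-- structural recursion on the remaining suffix of the sorted list.
def pvALoop : List Char → List Char
  | a :: b :: rest =>
      if a = b then
        (if a ≠ 'z' then Char.ofNat (a.toNat + 1) else 'a') :: pvALoop rest
      else
        a :: pvALoop (b :: rest)
  | _ => []

def calculate (string : String) : String :=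
  let sorted_str := PySem.List.sorted string.toList (fun x => x)
  let result := pvALoop sorted_str
  -- sorted_str[len(sorted_str) - 1]: IndexError (none) exactly when string = "" — excluded by Pre_
  match PySem.List.pyGet? sorted_str ((sorted_str.length : Int) - 1) with
  | none => String.ofList result
  | some last =>
      -- str.count with a one-character needle is the character count: exact here
      String.ofList (result ++ (if PySem.List.count sorted_str last % 2 ≠ 0 then [last] else []))

-- ===== PORT B =====
def calculate_alt (string : String) : String :=
  let counts := string.toList.foldl
      (fun d ch => d.insert ch (d.getD ch 0 + 1)) (PySem.Dict.empty : PySem.Dict Char Int)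
  let pieces := (PySem.List.sorted counts.keys (fun x => x)).foldl
      (fun acc ch =>
        let n := counts.getD ch 0
        let nxt := if ch = 'z' then 'a' else Char.ofNat (ch.toNat + 1)
        acc ++ [PySem.List.pyRepeat [nxt] (PySem.Int.floordiv n 2) ++
                PySem.List.pyRepeat [ch] (PySem.Int.mod n 2)]) []
  String.ofList (PySem.Chars.join [] pieces)

-- ===== PRECONDITION & SPEC =====
-- A raises IndexError on the empty string (sorted_str[len-1] of ""); that input is excluded.
def Pre_calculate (string : String) : Prop := string ≠ ""
instance (string : String) : Decidable (Pre_calculate string) := by unfold Pre_calculate; infer_instance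
def pvWitness_calculate : String := "banana"

def Spec_calculate (string : String) (out : String) : Prop := out = calculate_alt string
instance (string : String) (out : String) : Decidable (Spec_calculate string out) := by unfold Spec_calculate; infer_instance

-- ===== CLAIM (what is proved, stated in full; the proofs are below) =====
def Claim_equal_calculate : Prop := ∀ (string : String), Dom_calculate string → Pre_calculate string → Spec_calculate string (calculate string)

-- ===== LEMMAS AND PROOFS =====

-- the promoted character, in B's branch order
def pvPromote (c : Char) : Char := if c = 'z' then 'a' else Char.ofNat (c.toNat + 1)

-- the contribution of one distinct character, counts read in l
def pvRunOut (l : List Char) (c : Char) : List Char :=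
  List.replicate (l.count c / 2) (pvPromote c) ++ List.replicate (l.count c % 2) c

def pvB (l : List Char) : List Char := (PySem.Set.ofList l).flatMap (pvRunOut l)

def pvTailFix (l : List Char) : List Char :=
  l.getLast?.elim [] (fun last => if l.count last % 2 ≠ 0 then [last] else [])

lemma pvALoop_pair (a : Char) (m : List Char) :
    pvALoop (a :: a :: m) = pvPromote a :: pvALoop m := by
  simp [pvALoop, pvPromote]

lemma pvALoop_run (c : Char) (rest : List Char) :
    ∀ n, pvALoop (List.replicate n c ++ rest) =
      List.replicate (n / 2) (pvPromote c) ++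
        (if n % 2 = 1 then pvALoop (c :: rest) else pvALoop rest) := by
  intro n
  induction n using Nat.strong_induction_on with
  | _ n ih =>
    match n with
    | 0 => simp
    | 1 => simp [List.replicate]
    | (k + 2) =>
      have h1 : List.replicate (k + 2) c ++ rest = c :: c :: (List.replicate k c ++ rest) := by
        simp [List.replicate]
      rw [h1, pvALoop_pair, ih k (by omega)]
      have h2 : (k + 2) / 2 = k / 2 + 1 := by omega
      have h3 : (k + 2) % 2 = k % 2 := by omega
      rw [h2, h3]
      simp [List.replicate_succ]

lemma pvALoop_single_cons (c d : Char) (t : List Char) (h : c ≠ d) :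
    pvALoop (c :: d :: t) = c :: pvALoop (d :: t) := by
  simp [pvALoop, h]

lemma pvOfList_run (c : Char) (rest : List Char) (hc : c ∉ rest) :
    ∀ n, PySem.Set.ofList (List.replicate (n + 1) c ++ rest) = c :: PySem.Set.ofList rest := by
  have hfilter : List.filter (fun y => !(y == c)) (PySem.Set.ofList rest) = PySem.Set.ofList rest := by
    apply List.filter_eq_self.mpr
    intro y hy
    have hmem : y ∈ rest := (PySem.Set.mem_ofList rest y).mp hy
    have : y ≠ c := fun h => hc (h ▸ hmem)
    simpa using this
  intro n
  induction n with
  | zero =>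
    rw [List.replicate_one, List.singleton_append, PySem.Set.ofList_cons]
    congr 1
  | succ m ih =>
    have h1 : List.replicate (m + 2) c ++ rest = c :: (List.replicate (m + 1) c ++ rest) := by
      simp [List.replicate]
    rw [h1, PySem.Set.ofList_cons, ih]
    congr 1
    have h2 : PySem.Set.discard (c :: PySem.Set.ofList rest) c =
        List.filter (fun y => !(y == c)) (c :: PySem.Set.ofList rest) := rfl
    rw [h2, List.filter_cons_of_neg (by simp)]
    exact hfilter

lemma pvRun_split (c : Char) (l : List Char) (h : (c :: l).Pairwise (· ≤ ·)) :
    ∃ n rest, c :: l = List.replicate (n + 1) c ++ rest ∧ (∀ d ∈ rest, c < d) ∧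
      rest.Pairwise (· ≤ ·) ∧ rest.length ≤ l.length := by
  induction l generalizing c with
  | nil => exact ⟨0, [], by simp, by simp, by simp, by simp⟩
  | cons d t ih =>
    by_cases hcd : c = d
    · subst hcd
      obtain ⟨n, rest, he, hlt, hp, hlen⟩ := ih c h.tail
      exact ⟨n + 1, rest, by rw [List.replicate_succ, List.cons_append, ← he],
        hlt, hp, by simpa using Nat.le_succ_of_le hlen⟩
    · refine ⟨0, d :: t, by simp, ?_, h.tail, by simp⟩
      intro e he2
      have hce : c ≤ e := (List.pairwise_cons.mp h).1 e he2
      refine lt_of_le_of_ne hce ?_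
      rcases List.mem_cons.mp he2 with rfl | hmem
      · exact hcd
      · intro hEq
        have hde : d ≤ e := (List.pairwise_cons.mp h.tail).1 e hmem
        have hcd' : c ≤ d := (List.pairwise_cons.mp h).1 d (by simp)
        exact hcd (le_antisymm hcd' (hEq ▸ hde))

lemma pvMain : ∀ (N : Nat) (l : List Char), l.length ≤ N → l.Pairwise (· ≤ ·) →
    pvALoop l ++ pvTailFix l = pvB l := by
  intro N
  induction N with
  | zero =>
    intro l hl _
    have : l = [] := List.eq_nil_of_length_eq_zero (Nat.le_zero.mp hl)
    subst this
    simp [pvALoop, pvTailFix, pvB, PySem.Set.ofList]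
  | succ N ih =>
    intro l hl hp
    match l with
    | [] => simp [pvALoop, pvTailFix, pvB, PySem.Set.ofList]
    | c :: t =>
      obtain ⟨n, rest, he, hlt, hrp, hlen⟩ := pvRun_split c t hp
      have hne : ∀ d ∈ rest, c ≠ d := fun d hd => ne_of_lt (hlt d hd)
      have hcnotin : c ∉ rest := fun hmem => (hne c hmem) rfl
      have hrestlen : rest.length ≤ N := by
        have : t.length ≤ N := by simpa using hl
        omega
      rw [he]
      have hcountc : (List.replicate (n + 1) c ++ rest).count c = n + 1 := by
        simp [List.count_append, List.count_replicate_self, List.count_eq_zero.mpr hcnotin]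
      have hcountd : ∀ d, d ≠ c → (List.replicate (n + 1) c ++ rest).count d = rest.count d := by
        intro d hd
        simp [List.count_append, List.count_replicate, Ne.symm hd]
      have hB : pvB (List.replicate (n + 1) c ++ rest) =
          (List.replicate ((n + 1) / 2) (pvPromote c) ++ List.replicate ((n + 1) % 2) c) ++
            pvB rest := by
        unfold pvB
        rw [pvOfList_run c rest hcnotin n, List.flatMap_cons]
        congr 1
        · unfold pvRunOut; rw [hcountc]
        · refine List.flatMap_congr ?_
          intro x hx
          have hxr : x ∈ rest := (PySem.Set.mem_ofList rest x).mp hx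
          unfold pvRunOut
          rw [hcountd x (hne x hxr).symm]
      rw [hB, pvALoop_run c rest (n + 1)]
      match rest, hlt, hrp, hrestlen, hcountd with
      | [], _, _, _, _ =>
        have hlast : (List.replicate (n + 1) c ++ ([] : List Char)).getLast? = some c := by
          rw [List.append_nil, List.getLast?_eq_getElem?]
          simp
        have htf : pvTailFix (List.replicate (n + 1) c ++ []) =
            if (n + 1) % 2 ≠ 0 then [c] else [] := by
          unfold pvTailFix
          rw [hlast]
          simp only [Option.elim_some]
          rw [hcountc]
        rw [htf]
        have hBnil : pvB ([] : List Char) = [] := by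
          simp [pvB, PySem.Set.ofList]
        rw [hBnil]
        rcases Nat.mod_two_eq_zero_or_one (n + 1) with hm | hm <;>
          simp [hm, pvALoop]
      | d :: t', hlt, hrp, hrestlen, hcountd =>
        have hrne : (d :: t') ≠ ([] : List Char) := by simp
        have htf : pvTailFix (List.replicate (n + 1) c ++ (d :: t')) = pvTailFix (d :: t') := by
          unfold pvTailFix
          rw [List.getLast?_append_of_ne_nil _ hrne]
          cases hx : (d :: t').getLast? with
          | none => rfl
          | some x =>
            have hxmem : x ∈ d :: t' := List.mem_of_getLast? hx
            simp only [Option.elim_some]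
            rw [hcountd x (hne x hxmem).symm]
        have hstep : pvALoop (c :: d :: t') = c :: pvALoop (d :: t') :=
          pvALoop_single_cons c d t' (hne d (by simp))
        have hih : pvALoop (d :: t') ++ pvTailFix (d :: t') = pvB (d :: t') :=
          ih (d :: t') hrestlen hrp
        rw [htf, hstep]
        rcases Nat.mod_two_eq_zero_or_one (n + 1) with hm | hm <;>
          simp [hm, List.append_assoc, hih]

lemma pvOfList_sublist (l : List Char) : (PySem.Set.ofList l).Sublist l := by
  induction l with
  | nil => simp [PySem.Set.ofList]
  | cons x m ih =>
    rw [PySem.Set.ofList_cons]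
    refine List.Sublist.cons₂ x ?_
    have h1 : PySem.Set.discard (PySem.Set.ofList m) x =
        List.filter (fun y => !(y == x)) (PySem.Set.ofList m) := rfl
    rw [h1]
    exact List.Sublist.trans List.filter_sublist ih

lemma pvOfList_pairwise_lt (l : List Char) (h : l.Pairwise (· ≤ ·)) :
    (PySem.Set.ofList l).Pairwise (· < ·) := by
  have h1 : (PySem.Set.ofList l).Pairwise (· ≤ ·) :=
    List.Pairwise.sublist (pvOfList_sublist l) h
  have h2 : (PySem.Set.ofList l).Pairwise (· ≠ ·) := PySem.Set.nodup_ofList l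
  exact (h1.and h2).imp (fun hab => lt_of_le_of_ne hab.1 hab.2)

lemma pvJoin_nil : ∀ ps : List (List Char), PySem.Chars.join [] ps = ps.flatten
  | [] => by rw [PySem.Chars.join_nil]; rfl
  | [p] => by rw [PySem.Chars.join_singleton]; simp
  | p :: q :: t => by rw [PySem.Chars.join_cons_cons, pvJoin_nil (q :: t)]; simp

-- bridge: A's port computes pvALoop ++ pvTailFix on the sorted character list
lemma pvCalc_eq (s : String) (h : s ≠ "") :
    calculate s = String.ofList (pvALoop (PySem.List.sorted s.toList (fun x => x)) ++
      pvTailFix (PySem.List.sorted s.toList (fun x => x))) := by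
  have hL : PySem.List.sorted s.toList (fun x => x) ≠ [] := by
    intro hc
    exact h (String.toList_eq_nil_iff.mp ((PySem.List.sorted_eq_nil_iff _ _ _).mp hc))
  simp only [calculate]
  have hpos : (PySem.List.sorted s.toList (fun x => x)).length ≠ 0 :=
    fun h0 => hL (List.length_eq_zero_iff.mp h0)
  obtain ⟨m, hm⟩ := Nat.exists_eq_succ_of_ne_zero hpos
  have hcast : (((PySem.List.sorted s.toList (fun x => x)).length : Int) - 1) = ((m : Nat) : Int) := by
    rw [hm]; push_cast; ring
  have hget : PySem.List.pyGet? (PySem.List.sorted s.toList (fun x => x))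
      (((PySem.List.sorted s.toList (fun x => x)).length : Int) - 1) =
      (PySem.List.sorted s.toList (fun x => x)).getLast? := by
    rw [hcast, PySem.List.pyGet?_natCast, List.getLast?_eq_getElem?, hm]
    simp
  rw [hget]
  cases hx : (PySem.List.sorted s.toList (fun x => x)).getLast? with
  | none => exact (hL (List.getLast?_eq_none_iff.mp hx)).elim
  | some last =>
    dsimp only
    have htf : pvTailFix (PySem.List.sorted s.toList (fun x => x)) =
        if (PySem.List.sorted s.toList (fun x => x)).count last % 2 ≠ 0 then [last] else [] := by
      unfold pvTailFix
      rw [hx]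
      simp only [Option.elim_some]
    rw [htf, PySem.List.count_eq]

-- bridge: B's port computes pvB on the sorted character list
lemma pvCalcAlt_eq (s : String) :
    calculate_alt s = String.ofList (pvB (PySem.List.sorted s.toList (fun x => x))) := by
  simp only [calculate_alt]
  have hkeys : (s.toList.foldl (fun d ch => d.insert ch (d.getD ch 0 + 1))
      (PySem.Dict.empty : PySem.Dict Char Int)).keys = PySem.Set.ofList s.toList := by
    rw [PySem.Dict.keys_foldl_insert s.toList (fun d x => d.getD x 0 + 1) PySem.Dict.empty,
      PySem.Dict.keys_empty, PySem.Set.update_nil_left]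
  have hsorted : PySem.List.sorted (PySem.Set.ofList s.toList) (fun x => x) =
      PySem.Set.ofList (PySem.List.sorted s.toList (fun x => x)) := by
    apply PySem.List.sorted_eq_of_perm_of_pairwise_lt
    · refine (List.perm_ext_iff_of_nodup (PySem.Set.nodup_ofList _) (PySem.Set.nodup_ofList _)).mpr ?_
      intro a
      rw [PySem.Set.mem_ofList, PySem.Set.mem_ofList, PySem.List.mem_sorted]
    · exact pvOfList_pairwise_lt _ (PySem.List.sorted_pairwise s.toList (fun x => x))
  rw [hkeys, hsorted, PySem.List.foldl_append_singleton_eq_map, List.nil_append, pvJoin_nil,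
    ← List.flatMap_def]
  congr 1
  refine List.flatMap_congr ?_
  intro ch hch
  have hget : (s.toList.foldl (fun d ch => d.insert ch (d.getD ch 0 + 1))
      (PySem.Dict.empty : PySem.Dict Char Int)).getD ch 0 = ((s.toList.count ch : Nat) : Int) := by
    rw [PySem.Dict.getD_foldl_insert_add_one, PySem.Dict.getD_empty]
    simp
  have hcount : (PySem.List.sorted s.toList (fun x => x)).count ch = s.toList.count ch :=
    (PySem.List.sorted_perm s.toList (fun x => x) false).count_eq ch
  have hdiv : PySem.Int.floordiv ((s.toList.count ch : Nat) : Int) 2 =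
      ((s.toList.count ch / 2 : Nat) : Int) := by
    exact_mod_cast PySem.Int.floordiv_natCast (s.toList.count ch) 2
  have hmod : PySem.Int.mod ((s.toList.count ch : Nat) : Int) 2 =
      ((s.toList.count ch % 2 : Nat) : Int) := by
    exact_mod_cast PySem.Int.mod_natCast (s.toList.count ch) 2
  rw [hget, hdiv, hmod, PySem.List.pyRepeat_singleton, PySem.List.pyRepeat_singleton,
    Int.toNat_natCast, Int.toNat_natCast]
  unfold pvRunOut pvPromote
  rw [hcount]

-- ===== VERDICT (by name: the statement is the Claim_ definition above) =====
theorem calculate_spec : Claim_equal_calculate := by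
  intro s _ hpre
  unfold Spec_calculate
  rw [pvCalc_eq s hpre, pvCalcAlt_eq s]
  congr 1
  exact pvMain (PySem.List.sorted s.toList (fun x => x)).length _ le_rfl
    (PySem.List.sorted_pairwise s.toList (fun x => x))
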